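-- pv_equiv track=rewrite | github.com/Zweitschoenster/KREIS_KREUZWORTRAETSEL_GUI | KREIS_WORTSPIEL_V3.py | _rotate_quad_texts
-- ===== SOURCE A (Python) =====
-- def _rotate_quad_texts(texts, steps_cw: int):
--     """
--     texts = [UL, UR, LL, LR] (entspricht Textshape _1,_2,_3,_4)
--     steps_cw: 0..3 (90° pro Schritt im Uhrzeigersinn)
--     """
--     steps_cw %= 4
--     if steps_cw == 0:
--         return texts[:]
--
--     # Uhrzeigersinn 90°: UL->UR, UR->LR, LR->LL, LL->UL
--     # also neues [UL,UR,LL,LR] aus altem: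
--     # newUL = oldLL, newUR = oldUL, newLL = oldLR, newLR = oldUR  (für 90° CW)
--     def rot90(t):
--         ul, ur, ll, lr = t
--         return [ll, ul, lr, ur]
--
--     out = texts[:]
--     for _ in range(steps_cw):
--         out = rot90(out)
--     return out
-- ===== SOURCE B (Python) =====
-- _PERM = {1: (2, 0, 3, 1), 2: (3, 2, 1, 0), 3: (1, 3, 0, 2)}
--
-- def _rotate_quad_texts(texts, steps_cw: int):
--     steps_cw %= 4
--     if steps_cw == 0:
--         return texts[:]
--     return [texts[i] for i in _PERM[steps_cw]]
-- ===== Notes on version B (the rewrite author's own statement) =====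
-- stated objective: simpler
-- what changed: Replaces the rot90 helper and the iterated 90-degree rotation loop with a single precomputed permutation table lookup giving the final positions directly.
import Mathlib
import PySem

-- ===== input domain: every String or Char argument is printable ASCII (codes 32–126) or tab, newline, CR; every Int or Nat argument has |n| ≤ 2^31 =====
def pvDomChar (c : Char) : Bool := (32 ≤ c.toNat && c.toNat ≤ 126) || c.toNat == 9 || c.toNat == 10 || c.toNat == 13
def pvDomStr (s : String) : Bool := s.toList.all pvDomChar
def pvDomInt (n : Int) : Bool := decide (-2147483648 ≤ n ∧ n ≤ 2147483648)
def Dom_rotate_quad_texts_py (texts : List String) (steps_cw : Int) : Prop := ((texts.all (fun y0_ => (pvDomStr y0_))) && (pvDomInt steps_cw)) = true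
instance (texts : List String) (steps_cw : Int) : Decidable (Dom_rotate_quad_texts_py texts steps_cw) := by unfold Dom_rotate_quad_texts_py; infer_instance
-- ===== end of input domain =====

-- B replaces the iterated 90° rotation loop with one precomputed permutation-table lookup (simpler).

-- ===== PORT A =====
-- rot90 unpacks exactly four elements; outside Pre_ (length ≠ 4) Python raises, value here is unclaimed
def pvRot90 (t : List String) : List String :=
  match t with
  | [ul, ur, ll, lr] => [ll, ul, lr, ur]
  | _ => []

def rotate_quad_texts_py (texts : List String) (steps_cw : Int) : List String :=
  let s := PySem.Int.mod steps_cw 4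
  if s = 0 then texts
  else (List.range s.toNat).foldl (fun out _ => pvRot90 out) texts

-- ===== PORT B =====
def pvPerm (s : Int) : List Int :=
  if s = 1 then [2, 0, 3, 1] else if s = 2 then [3, 2, 1, 0] else [1, 3, 0, 2]

def rotate_quad_texts_py_alt (texts : List String) (steps_cw : Int) : List String :=
  let s := PySem.Int.mod steps_cw 4
  if s = 0 then texts
  else (pvPerm s).map (fun i => (PySem.List.pyGet? texts i).getD "")

-- ===== PRECONDITION & SPEC =====
-- A raises ValueError (tuple unpacking) whenever steps_cw % 4 ≠ 0 and len(texts) ≠ 4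
def Pre_rotate_quad_texts_py (texts : List String) (steps_cw : Int) : Prop :=
  PySem.Int.mod steps_cw 4 = 0 ∨ texts.length = 4
instance (texts : List String) (steps_cw : Int) : Decidable (Pre_rotate_quad_texts_py texts steps_cw) := by unfold Pre_rotate_quad_texts_py; infer_instance

def pvWitness_rotate_quad_texts_py : List String × Int := (["UL", "UR", "LL", "LR"], 1)

def Spec_rotate_quad_texts_py (texts : List String) (steps_cw : Int) (out : List String) : Prop := out = rotate_quad_texts_py_alt texts steps_cw
instance (texts : List String) (steps_cw : Int) (out : List String) : Decidable (Spec_rotate_quad_texts_py texts steps_cw out) := by unfold Spec_rotate_quad_texts_py; infer_instance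

-- ===== CLAIM (what is proved, stated in full; the proofs are below) =====
def Claim_equal_rotate_quad_texts_py : Prop := ∀ (texts : List String) (steps_cw : Int), Dom_rotate_quad_texts_py texts steps_cw → Pre_rotate_quad_texts_py texts steps_cw → Spec_rotate_quad_texts_py texts steps_cw (rotate_quad_texts_py texts steps_cw)

-- ===== LEMMAS AND PROOFS =====
theorem pvMod4_cases (n : Int) :
    PySem.Int.mod n 4 = 0 ∨ PySem.Int.mod n 4 = 1 ∨ PySem.Int.mod n 4 = 2 ∨ PySem.Int.mod n 4 = 3 := by
  have he : PySem.Int.mod n 4 = n.fmod 4 := by simp [PySem.Int.mod]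
  have h2 : n.fmod 4 = n % 4 := by rw [Int.fmod_eq_emod]; simp
  have h0 : 0 ≤ n % 4 := Int.emod_nonneg n (by norm_num)
  have h4 : n % 4 < 4 := Int.emod_lt_of_pos n (by norm_num)
  omega

-- ===== VERDICT (by name: the statement is the Claim_ definition above) =====
theorem rotate_quad_texts_py_spec : Claim_equal_rotate_quad_texts_py := by
  intro texts steps_cw _ hpre
  unfold Spec_rotate_quad_texts_py rotate_quad_texts_py rotate_quad_texts_py_alt
  rcases pvMod4_cases steps_cw with h | h | h | h
  · simp only [h]; simp
  · rcases hpre with h0 | hlen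
    · omega
    · match texts, hlen with
      | [a, b, c, d], _ =>
        simp only [h]; simp [pvPerm, List.range_succ, pvRot90, PySem.List.pyGet?, PySem.List.pyIdx?]
  · rcases hpre with h0 | hlen
    · omega
    · match texts, hlen with
      | [a, b, c, d], _ =>
        simp only [h]; simp [pvPerm, List.range_succ, pvRot90, PySem.List.pyGet?, PySem.List.pyIdx?]
  · rcases hpre with h0 | hlen
    · omega
    · match texts, hlen with
      | [a, b, c, d], _ =>
        simp only [h]; simp [pvPerm, List.range_succ, pvRot90, PySem.List.pyGet?, PySem.List.pyIdx?]
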